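-- pv_equiv track=rewrite | github.com/yesdeepakmittal/interview-corner | otherSnippets/bulbs.py | bulbs
-- ===== SOURCE A (Python) =====
-- def bulbs(A):
--     cnt = 0
--     # for i in range(len(A)):
--     #     if A[i] != 1:
--     #         cnt += 1
--     #         for j in range(i+1,len(A)):
--     #             A[j] = A[j] ^ 1
--     # return cnt
--
--     ''''
--     cnt %2 == 0 - means bulbs are now on initial state
--     if A[i] == 0 and cnt%2 != 0 means it is inverted and no need to count for that case
--     '''
--
--     for i in range(len(A)):
--         if A[i] == 1 and cnt %2 == 0:
--             continue
--         elif A[i] == 0 and cnt%2 != 0: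
--             continue
--         elif A[i] == 1 and cnt%2 != 0:
--             cnt += 1
--         elif A[i] == 0 and cnt % 2 == 0:
--             cnt += 1
--     return cnt
-- ===== SOURCE B (Python) =====
-- def bulbs(A):
--     # Staged, stateless pipeline: keep only binary values, prepend the
--     # virtual all-on state 1, and count mismatched adjacent pairs.
--     b = [x for x in A if x == 0 or x == 1]
--     s = [1] + b
--     return sum(1 for u, v in zip(s, s[1:]) if u != v)
-- ===== Notes on version B (the rewrite author's own statement) =====
-- stated objective: alternative
-- what changed: Replaces A's single stateful pass with a cnt-parity four-way elif chain by a stateless staged pipeline: filter to binary values, prepend a virtual 1, and count mismatched adjacent pairs via zip of the list with its tail.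
import Mathlib
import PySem

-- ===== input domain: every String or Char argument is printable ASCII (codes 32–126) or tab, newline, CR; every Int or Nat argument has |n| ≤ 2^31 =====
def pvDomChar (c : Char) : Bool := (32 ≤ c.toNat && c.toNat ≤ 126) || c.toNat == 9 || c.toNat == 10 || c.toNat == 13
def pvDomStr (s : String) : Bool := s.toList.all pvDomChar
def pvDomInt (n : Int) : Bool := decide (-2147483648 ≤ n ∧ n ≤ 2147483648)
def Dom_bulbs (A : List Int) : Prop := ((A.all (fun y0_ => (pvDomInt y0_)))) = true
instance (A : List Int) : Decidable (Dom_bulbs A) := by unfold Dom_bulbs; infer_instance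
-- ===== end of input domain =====

-- B replaces A's stateful parity pass by a stateless staged pipeline (filter, prepend 1, count mismatched zip pairs); same cost, different decomposition.

-- ===== PORT A =====
-- A: single pass, four-way elif on (A[i], cnt % 2).
def bulbs (A : List Int) : Int :=
  A.foldl (fun cnt x =>
    if x = 1 ∧ PySem.Int.mod cnt 2 = 0 then cnt
    else if x = 0 ∧ PySem.Int.mod cnt 2 ≠ 0 then cnt
    else if x = 1 ∧ PySem.Int.mod cnt 2 ≠ 0 then cnt + 1
    else if x = 0 ∧ PySem.Int.mod cnt 2 = 0 then cnt + 1
    else cnt) 0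

-- ===== PORT B =====
-- B: filter to binary values, prepend 1, count mismatched adjacent pairs via zip with tail.
def bulbs_alt (A : List Int) : Int :=
  let b := A.filter (fun x => x = 0 ∨ x = 1)
  let s := (1 : Int) :: b
  ((s.zip s.tail).filter (fun p => p.1 ≠ p.2)).length

-- ===== PRECONDITION & SPEC =====
def Spec_bulbs (A : List Int) (out : Int) : Prop := out = bulbs_alt A
instance (A : List Int) (out : Int) : Decidable (Spec_bulbs A out) := by unfold Spec_bulbs; infer_instance

-- ===== CLAIM (what is proved, stated in full; the proofs are below) =====
def Claim_equal_bulbs : Prop := ∀ (A : List Int), Dom_bulbs A → Spec_bulbs A (bulbs A)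

-- ===== LEMMAS AND PROOFS =====

-- Number of transitions in p :: l, recursively.
def pvTrans (p : Int) (l : List Int) : Nat :=
  match l with
  | [] => 0
  | x :: t => (if x ≠ p then 1 else 0) + pvTrans x t

theorem pvZip_trans (l : List Int) (p : Int) :
    ((((p :: l).zip (p :: l).tail).filter (fun q => q.1 ≠ q.2)).length) = pvTrans p l := by
  induction l generalizing p with
  | nil => simp [pvTrans]
  | cons x t ih =>
    have H := ih x
    by_cases h : x = p
    · subst h
      simp [pvTrans] at H ⊢
      exact H
    · simp [pvTrans, h, Ne.symm h] at H ⊢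
      omega

-- A's loop, with Python's mod replaced by Int.emod (equal for positive divisor).
theorem pvFold_trans (l : List Int) (cnt : Int) :
    l.foldl (fun cnt x =>
      if x = 1 ∧ cnt % 2 = 0 then cnt
      else if x = 0 ∧ cnt % 2 ≠ 0 then cnt
      else if x = 1 ∧ cnt % 2 ≠ 0 then cnt + 1
      else if x = 0 ∧ cnt % 2 = 0 then cnt + 1
      else cnt) cnt
    = cnt + pvTrans (if cnt % 2 = 0 then 1 else 0)
        (l.filter (fun x => x = 0 ∨ x = 1)) := by
  induction l generalizing cnt with
  | nil => simp [pvTrans]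
  | cons x t ih =>
    rcases Int.emod_two_eq_zero_or_one cnt with hm | hm
    · have hd : (2:Int) ∣ cnt := by omega
      by_cases hx1 : x = 1
      · subst hx1
        have H := ih cnt
        simp [pvTrans, hm, hd] at H ⊢
        omega
      · by_cases hx0 : x = 0
        · subst hx0
          have h1 : (cnt + 1) % 2 = 1 := by omega
          have H := ih (cnt + 1)
          simp [pvTrans, hm, h1, hd] at H ⊢
          omega
        · have H := ih cnt
          simp [hm, hx0, hx1] at H ⊢
          omega
    · have h0 : cnt % 2 ≠ 0 := by omega
      have hd : ¬ (2:Int) ∣ cnt := by omega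
      by_cases hx1 : x = 1
      · subst hx1
        have h1 : (cnt + 1) % 2 = 0 := by omega
        have H := ih (cnt + 1)
        simp [pvTrans, hm, h1, hd] at H ⊢
        omega
      · by_cases hx0 : x = 0
        · subst hx0
          have H := ih cnt
          simp [pvTrans, hm] at H ⊢
          omega
        · have H := ih cnt
          simp [hm, hx0, hx1] at H ⊢
          omega

-- ===== VERDICT (by name: the statement is the Claim_ definition above) =====
theorem bulbs_spec : Claim_equal_bulbs := by
  intro A _
  unfold Spec_bulbs bulbs bulbs_alt
  have hme : ∀ a : Int, PySem.Int.mod a 2 = a % 2 := fun a =>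
    PySem.Int.mod_eq_emod_of_pos (by omega)
  simp only [hme]
  have h := pvFold_trans A 0
  have hz := pvZip_trans (A.filter (fun x => decide (x = 0 ∨ x = 1))) 1
  simp only [show ((0:Int) % 2 = 0) = True from by simp, if_pos trivial] at h
  rw [h, ← hz]
  simp
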